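-- pv_equiv track=rewrite | github.com/s-nlp/synthdetoxm | src/api.py | extract_toxic_sentences
-- ===== SOURCE A (Python) =====
-- from typing import Dict, List, Optional, Tuple, Union
--
-- def extract_toxic_sentences(
--     text: str, sentences: List[str], toxic_spans: List[Tuple[int, int]]
-- ) -> List[str]:
--     """
--     Identifies sentences that overlap with toxic spans.
--
--     Args:
--         text (str): The original text.
--         sentences (list): A list of sentences extracted from the text.
--         toxic_spans (list): A list of tuples representing the start and end positions of toxic spans.
--
--     Returns:
--         list: A list of sentences that overlap with any of the toxic spans.
--     """
--     toxic_sentences = []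
--
--     sentence_start_pos = 0
--     for sentence in sentences:
--         sentence_end_pos = sentence_start_pos + len(sentence)
--
--         if any(
--             span_start < sentence_end_pos and span_end > sentence_start_pos
--             for span_start, span_end in toxic_spans
--         ):
--             toxic_sentences.append(sentence)
--
--         sentence_start_pos = sentence_end_pos + 1
--
--     return toxic_sentences
-- ===== SOURCE B (Python) =====
-- from bisect import bisect_left, bisect_right
--
--
-- def extract_toxic_sentences(text, sentences, toxic_spans):
--     starts = []
--     ends = []
--     pos = 0
--     for sentence in sentences:
--         starts.append(pos)
--         ends.append(pos + len(sentence))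
--         pos += len(sentence) + 1
--
--     # Each span marks a contiguous index range of sentences, found by binary search:
--     # sentence ends are strictly increasing, sentence starts are strictly increasing.
--     diff = [0] * (len(sentences) + 1)
--     for span_start, span_end in toxic_spans:
--         lo = bisect_right(ends, span_start)   # first sentence with end > span_start
--         hi = bisect_left(starts, span_end)    # first sentence with start >= span_end
--         if lo < hi:
--             diff[lo] += 1
--             diff[hi] -= 1
--
--     result = []
--     cover = 0
--     for i, sentence in enumerate(sentences):
--         cover += diff[i]
--         if cover > 0:
--             result.append(sentence)
--     return result
-- ===== Notes on version B (the rewrite author's own statement) =====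
-- stated objective: faster
-- what changed: Replaces A's per-sentence scan of all toxic spans by a span-major pass: sentence start/end offsets are strictly increasing, so each span marks a contiguous sentence range found by two binary searches; ranges are accumulated in a difference array and a single prefix-sum pass emits the overlapped sentences.
import Mathlib
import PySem

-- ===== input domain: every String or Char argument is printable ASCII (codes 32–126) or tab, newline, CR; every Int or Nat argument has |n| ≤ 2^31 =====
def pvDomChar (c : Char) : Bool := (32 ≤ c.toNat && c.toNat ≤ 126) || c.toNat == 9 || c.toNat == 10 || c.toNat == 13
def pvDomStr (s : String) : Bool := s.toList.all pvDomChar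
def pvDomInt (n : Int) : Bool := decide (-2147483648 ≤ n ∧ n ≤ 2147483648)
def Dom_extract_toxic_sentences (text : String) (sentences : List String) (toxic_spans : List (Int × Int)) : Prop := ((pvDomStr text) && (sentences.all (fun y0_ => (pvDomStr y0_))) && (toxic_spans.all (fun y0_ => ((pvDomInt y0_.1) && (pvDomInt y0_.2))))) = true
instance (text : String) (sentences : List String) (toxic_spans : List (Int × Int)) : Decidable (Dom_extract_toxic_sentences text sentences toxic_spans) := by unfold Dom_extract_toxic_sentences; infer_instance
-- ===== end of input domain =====

-- B replaces A's per-sentence scan of all spans by span-major binary searches on the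
-- (strictly increasing) sentence start/end offsets plus a difference array: faster by
-- an asymptotic change (O(S·T) → O(S + T·log S)).

-- ===== PORT A =====
def extract_toxic_sentences (text : String) (sentences : List String) (toxic_spans : List (Int × Int)) : List String :=
  (sentences.foldl (fun (st : List String × Int) sentence =>
      let sentence_end_pos : Int := st.2 + PySem.Str.len sentence
      ((if toxic_spans.any (fun sp => decide (sp.1 < sentence_end_pos) && decide (sp.2 > st.2))
        then st.1 ++ [sentence] else st.1),
       sentence_end_pos + 1))
    ([], 0)).1

-- ===== PORT B =====
def extract_toxic_sentences_alt (text : String) (sentences : List String) (toxic_spans : List (Int × Int)) : List String :=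
  let se := sentences.foldl (fun (st : List Int × List Int × Int) sentence =>
      (st.1 ++ [st.2.2], st.2.1 ++ [st.2.2 + PySem.Str.len sentence],
       st.2.2 + PySem.Str.len sentence + 1)) ([], [], 0)
  let starts := se.1
  let ends := se.2.1
  let diff := toxic_spans.foldl (fun (d : List Int) sp =>
      let lo := PySem.List.bisectRight ends sp.1
      let hi := PySem.List.bisectLeft starts sp.2
      if lo < hi then
        let d1 := d.set lo (PySem.List.pyGetD d (lo : Int) 0 + 1)
        d1.set hi (PySem.List.pyGetD d1 (hi : Int) 0 - 1)
      else d)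
    (List.replicate (sentences.length + 1) 0)
  ((PySem.List.enumerate sentences).foldl (fun (st : Int × List String) p =>
      let cover := st.1 + PySem.List.pyGetD diff p.1 0
      (cover, if 0 < cover then st.2 ++ [p.2] else st.2)) (0, [])).2

-- ===== PRECONDITION & SPEC =====
def Spec_extract_toxic_sentences (text : String) (sentences : List String) (toxic_spans : List (Int × Int)) (out : List String) : Prop := out = extract_toxic_sentences_alt text sentences toxic_spans
instance (text : String) (sentences : List String) (toxic_spans : List (Int × Int)) (out : List String) : Decidable (Spec_extract_toxic_sentences text sentences toxic_spans out) := by unfold Spec_extract_toxic_sentences; infer_instance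

-- ===== CLAIM (what is proved, stated in full; the proofs are below) =====
def Claim_equal_extract_toxic_sentences : Prop := ∀ (text : String) (sentences : List String) (toxic_spans : List (Int × Int)), Dom_extract_toxic_sentences text sentences toxic_spans → Spec_extract_toxic_sentences text sentences toxic_spans (extract_toxic_sentences text sentences toxic_spans)

-- ===== LEMMAS AND PROOFS =====

-- (start, end) offset of each sentence, as A walks them
def pvPosList (t : List String) (p : Int) : List (Int × Int) :=
  match t with
  | [] => []
  | s :: t => (p, p + PySem.Str.len s) :: pvPosList t (p + PySem.Str.len s + 1)

-- reference result: A's loop as a structural recursion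
def pvRef (spans : List (Int × Int)) (t : List String) (p : Int) : List String :=
  match t with
  | [] => []
  | s :: t =>
    (if spans.any (fun sp => decide (sp.1 < p + PySem.Str.len s) && decide (sp.2 > p)) then [s] else []) ++
    pvRef spans t (p + PySem.Str.len s + 1)

def pvS (sentences : List String) : List Int := (pvPosList sentences 0).map Prod.fst
def pvE (sentences : List String) : List Int := (pvPosList sentences 0).map Prod.snd

def pvDiff (sentences : List String) (spans : List (Int × Int)) : List Int :=
  spans.foldl (fun (d : List Int) sp =>
      let lo := PySem.List.bisectRight (pvE sentences) sp.1
      let hi := PySem.List.bisectLeft (pvS sentences) sp.2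
      if lo < hi then
        let d1 := d.set lo (PySem.List.pyGetD d (lo : Int) 0 + 1)
        d1.set hi (PySem.List.pyGetD d1 (hi : Int) 0 - 1)
      else d)
    (List.replicate (sentences.length + 1) 0)

lemma pvStrLen_nonneg (s : String) : 0 ≤ PySem.Str.len s := by
  simp [PySem.Str.len_eq]

lemma pvA_fold (spans : List (Int × Int)) :
    ∀ (t : List String) (p : Int) (acc : List String),
    (t.foldl (fun (st : List String × Int) sentence =>
      ((if spans.any (fun sp => decide (sp.1 < st.2 + PySem.Str.len sentence) && decide (sp.2 > st.2))
        then st.1 ++ [sentence] else st.1),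
       st.2 + PySem.Str.len sentence + 1)) (acc, p)).1 = acc ++ pvRef spans t p := by
  intro t
  induction t with
  | nil => intro p acc; simp [pvRef]
  | cons s t ih =>
    intro p acc
    simp only [List.foldl_cons, pvRef]
    rw [ih]
    split_ifs <;> simp

lemma pvB_build :
    ∀ (t : List String) (p : Int) (S E : List Int),
    t.foldl (fun (st : List Int × List Int × Int) sentence =>
      (st.1 ++ [st.2.2], st.2.1 ++ [st.2.2 + PySem.Str.len sentence],
       st.2.2 + PySem.Str.len sentence + 1)) (S, E, p)
    = (S ++ (pvPosList t p).map Prod.fst, E ++ (pvPosList t p).map Prod.snd,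
       (t.foldl (fun q sentence => q + PySem.Str.len sentence + 1) p)) := by
  intro t
  induction t with
  | nil => intro p S E; simp [pvPosList]
  | cons s t ih =>
    intro p S E
    simp only [List.foldl_cons, pvPosList, List.map_cons]
    rw [ih]
    simp

lemma pvPosList_length (t : List String) (p : Int) : (pvPosList t p).length = t.length := by
  induction t generalizing p with
  | nil => simp [pvPosList]
  | cons s t ih => simp [pvPosList, ih]

lemma pvPosList_lb (t : List String) (p : Int) :
    ∀ x ∈ pvPosList t p, p ≤ x.1 ∧ x.1 ≤ x.2 := by
  induction t generalizing p with
  | nil => simp [pvPosList]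
  | cons s t ih =>
    intro x hx
    have hlen := pvStrLen_nonneg s
    simp only [pvPosList, List.mem_cons] at hx
    rcases hx with h | h
    · subst h; exact ⟨le_rfl, by omega⟩
    · have := ih (p + PySem.Str.len s + 1) x h
      omega

lemma pvStarts_sorted (t : List String) (p : Int) :
    List.Pairwise (· ≤ ·) ((pvPosList t p).map Prod.fst) := by
  induction t generalizing p with
  | nil => simp [pvPosList]
  | cons s t ih =>
    have hlen := pvStrLen_nonneg s
    simp only [pvPosList, List.map_cons, List.pairwise_cons]
    refine ⟨?_, ih _⟩
    intro y hy
    simp only [List.mem_map] at hy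
    obtain ⟨x, hx, rfl⟩ := hy
    have := pvPosList_lb t (p + PySem.Str.len s + 1) x hx
    omega

lemma pvEnds_sorted (t : List String) (p : Int) :
    List.Pairwise (· ≤ ·) ((pvPosList t p).map Prod.snd) := by
  induction t generalizing p with
  | nil => simp [pvPosList]
  | cons s t ih =>
    simp only [pvPosList, List.map_cons, List.pairwise_cons]
    refine ⟨?_, ih _⟩
    intro y hy
    simp only [List.mem_map] at hy
    obtain ⟨x, hx, rfl⟩ := hy
    have := pvPosList_lb t (p + PySem.Str.len s + 1) x hx
    omega

-- the index window a span marks, via the two binary searches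
lemma pvWindow (S E : List Int) (hS : List.Pairwise (· ≤ ·) S) (hE : List.Pairwise (· ≤ ·) E)
    (a b : Int) (i : Nat) (hiE : i < E.length) (hiS : i < S.length) :
    (PySem.List.bisectRight E a ≤ i ∧ i < PySem.List.bisectLeft S b) ↔ (a < E[i] ∧ S[i] < b) := by
  obtain ⟨hEle, hE1, hE2⟩ := PySem.List.bisectRight_spec E a hE
  obtain ⟨hSle, hS1, hS2⟩ := PySem.List.bisectLeft_spec S b hS
  constructor
  · rintro ⟨h1, h2⟩
    exact ⟨hE2 i hiE h1, hS1 i hiS h2⟩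
  · rintro ⟨h1, h2⟩
    constructor
    · by_contra h
      push_neg at h
      have := hE1 i hiE h
      omega
    · by_contra h
      push_neg at h
      have := hS2 i hiS h
      omega

lemma pvSum_take_set (l : List Int) (k m : Nat) (v : Int) (hk : k < l.length) :
    ((l.set k v).take m).sum = (l.take m).sum + (if k < m then v - l[k] else 0) := by
  induction l generalizing k m with
  | nil => simp at hk
  | cons a l ih =>
    cases k with
    | zero =>
      cases m with
      | zero => simp
      | succ m =>
        simp only [List.set_cons_zero, List.take_succ_cons, List.sum_cons, List.getElem_cons_zero]
        rw [if_pos (Nat.succ_pos m)]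
        ring
    | succ k =>
      cases m with
      | zero => simp
      | succ m =>
        have hk' : k < l.length := by simpa using hk
        simp only [List.set_cons_succ, List.take_succ_cons, List.sum_cons, ih k m hk',
          List.getElem_cons_succ, Nat.succ_lt_succ_iff]
        split_ifs <;> ring

lemma pvLenS (sentences : List String) : (pvS sentences).length = sentences.length := by
  simp [pvS, pvPosList_length]

lemma pvLenE (sentences : List String) : (pvE sentences).length = sentences.length := by
  simp [pvE, pvPosList_length]

lemma pvFold_length (sentences : List String) (spans : List (Int × Int)) :
    ∀ d : List Int,
    (spans.foldl (fun (d : List Int) sp =>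
      if PySem.List.bisectRight (pvE sentences) sp.1 < PySem.List.bisectLeft (pvS sentences) sp.2 then
        (d.set (PySem.List.bisectRight (pvE sentences) sp.1)
            (PySem.List.pyGetD d ((PySem.List.bisectRight (pvE sentences) sp.1 : Nat) : Int) 0 + 1)).set
          (PySem.List.bisectLeft (pvS sentences) sp.2)
          (PySem.List.pyGetD
            (d.set (PySem.List.bisectRight (pvE sentences) sp.1)
              (PySem.List.pyGetD d ((PySem.List.bisectRight (pvE sentences) sp.1 : Nat) : Int) 0 + 1))
            ((PySem.List.bisectLeft (pvS sentences) sp.2 : Nat) : Int) 0 - 1)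
      else d) d).length = d.length := by
  induction spans with
  | nil => intro d; rfl
  | cons sp spans ih =>
    intro d
    simp only [List.foldl_cons]
    rw [ih]
    split_ifs <;> simp [List.length_set]

lemma pvDiff_sum_aux (sentences : List String) :
    ∀ (spans : List (Int × Int)) (d : List Int) (i : Nat),
    i < sentences.length → sentences.length + 1 ≤ d.length →
    ((spans.foldl (fun (d : List Int) sp =>
      if PySem.List.bisectRight (pvE sentences) sp.1 < PySem.List.bisectLeft (pvS sentences) sp.2 then
        (d.set (PySem.List.bisectRight (pvE sentences) sp.1)
            (PySem.List.pyGetD d ((PySem.List.bisectRight (pvE sentences) sp.1 : Nat) : Int) 0 + 1)).set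
          (PySem.List.bisectLeft (pvS sentences) sp.2)
          (PySem.List.pyGetD
            (d.set (PySem.List.bisectRight (pvE sentences) sp.1)
              (PySem.List.pyGetD d ((PySem.List.bisectRight (pvE sentences) sp.1 : Nat) : Int) 0 + 1))
            ((PySem.List.bisectLeft (pvS sentences) sp.2 : Nat) : Int) 0 - 1)
      else d) d).take (i+1)).sum
      = (d.take (i+1)).sum + (spans.countP (fun sp =>
          decide (PySem.List.bisectRight (pvE sentences) sp.1 ≤ i)
          && decide (i < PySem.List.bisectLeft (pvS sentences) sp.2)) : Int) := by
  intro spans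
  induction spans with
  | nil => intro d i hi hd; simp
  | cons sp spans ih =>
    intro d i hi hd
    have hEsort : List.Pairwise (· ≤ ·) (pvE sentences) := pvEnds_sorted sentences 0
    have hSsort : List.Pairwise (· ≤ ·) (pvS sentences) := pvStarts_sorted sentences 0
    obtain ⟨hloLe, -, -⟩ := PySem.List.bisectRight_spec (pvE sentences) sp.1 hEsort
    obtain ⟨hhiLe, -, -⟩ := PySem.List.bisectLeft_spec (pvS sentences) sp.2 hSsort
    rw [pvLenE] at hloLe
    rw [pvLenS] at hhiLe
    simp only [List.foldl_cons]
    rw [ih _ i hi (by split_ifs <;> simp [List.length_set] <;> omega)]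
    rw [List.countP_cons]
    by_cases hcmp : PySem.List.bisectRight (pvE sentences) sp.1 < PySem.List.bisectLeft (pvS sentences) sp.2
    · rw [if_pos hcmp]
      have hlod : PySem.List.bisectRight (pvE sentences) sp.1 < d.length := by omega
      have hg1 : PySem.List.pyGetD d ((PySem.List.bisectRight (pvE sentences) sp.1 : Nat) : Int) 0
          = d[PySem.List.bisectRight (pvE sentences) sp.1] := by
        rw [PySem.List.pyGetD_natCast, List.getD_eq_getElem _ _ hlod]
      rw [hg1]
      have hbld1 : PySem.List.bisectLeft (pvS sentences) sp.2
          < (d.set (PySem.List.bisectRight (pvE sentences) sp.1)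
              (d[PySem.List.bisectRight (pvE sentences) sp.1] + 1)).length := by
        rw [List.length_set]; omega
      have hg2 : PySem.List.pyGetD (d.set (PySem.List.bisectRight (pvE sentences) sp.1)
            (d[PySem.List.bisectRight (pvE sentences) sp.1] + 1))
            ((PySem.List.bisectLeft (pvS sentences) sp.2 : Nat) : Int) 0
          = d[PySem.List.bisectLeft (pvS sentences) sp.2]'(by omega) := by
        rw [PySem.List.pyGetD_natCast, List.getD_eq_getElem _ _ hbld1]
        exact List.getElem_set_ne (Nat.ne_of_lt hcmp) _
      rw [hg2]
      rw [pvSum_take_set _ _ _ _ hbld1]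
      rw [pvSum_take_set _ _ _ _ hlod]
      rw [List.getElem_set_ne (Nat.ne_of_lt hcmp)]
      push_cast
      split_ifs <;> simp_all <;> omega
    · rw [if_neg hcmp]
      have hfalse : (decide (PySem.List.bisectRight (pvE sentences) sp.1 ≤ i)
          && decide (i < PySem.List.bisectLeft (pvS sentences) sp.2)) = false := by
        simp only [Bool.and_eq_false_iff, decide_eq_false_iff_not]
        omega
      rw [hfalse]
      simp

lemma pvDiff_sum (sentences : List String) (spans : List (Int × Int)) (i : Nat)
    (hi : i < sentences.length) :
    ((pvDiff sentences spans).take (i + 1)).sum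
      = (spans.countP (fun sp => decide (PySem.List.bisectRight (pvE sentences) sp.1 ≤ i)
          && decide (i < PySem.List.bisectLeft (pvS sentences) sp.2)) : Int) := by
  unfold pvDiff
  simp only []
  rw [pvDiff_sum_aux sentences spans _ i hi (by simp)]
  simp [List.take_replicate]

lemma pvDiff_length (sentences : List String) (spans : List (Int × Int)) :
    (pvDiff sentences spans).length = sentences.length + 1 := by
  unfold pvDiff
  simp only []
  rw [pvFold_length]
  simp

lemma pvMain (sentences : List String) (spans : List (Int × Int)) :
    ∀ (t : List String) (k : Nat) (p : Int) (cover : Int) (acc : List String),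
    sentences.drop k = t →
    (pvPosList sentences 0).drop k = pvPosList t p →
    cover = ((pvDiff sentences spans).take k).sum →
    ((PySem.List.enumerate t (k : Int)).foldl (fun (st : Int × List String) q =>
        let cover := st.1 + PySem.List.pyGetD (pvDiff sentences spans) q.1 0
        (cover, if 0 < cover then st.2 ++ [q.2] else st.2)) (cover, acc)).2
      = acc ++ pvRef spans t p := by
  intro t
  induction t with
  | nil =>
    intro k p cover acc _ _ _
    simp [PySem.List.enumerate_nil, pvRef]
  | cons s t ih =>
    intro k p cover acc hdrop hpos hcov
    have hk : k < sentences.length := by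
      by_contra h
      push_neg at h
      rw [List.drop_eq_nil_iff.mpr (by omega)] at hdrop
      exact List.cons_ne_nil s t hdrop.symm
    have hkP : k < (pvPosList sentences 0).length := by
      rw [pvPosList_length]; exact hk
    have hposk := List.drop_eq_getElem_cons hkP
    rw [hposk] at hpos
    have hposc : (pvPosList sentences 0)[k] = (p, p + PySem.Str.len s) ∧
        (pvPosList sentences 0).drop (k + 1) = pvPosList t (p + PySem.Str.len s + 1) := by
      rw [show pvPosList (s :: t) p
          = (p, p + PySem.Str.len s) :: pvPosList t (p + PySem.Str.len s + 1) from rfl] at hpos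
      exact ⟨(List.cons.injEq _ _ _ _).mp hpos |>.1, (List.cons.injEq _ _ _ _).mp hpos |>.2⟩
    have hdropk := List.drop_eq_getElem_cons hk
    rw [hdropk] at hdrop
    have hdrop' : sentences.drop (k + 1) = t := ((List.cons.injEq _ _ _ _).mp hdrop).2
    have hdlen : k < (pvDiff sentences spans).length := by
      rw [pvDiff_length]; omega
    have hcov' : cover + PySem.List.pyGetD (pvDiff sentences spans) (k : Int) 0
        = ((pvDiff sentences spans).take (k + 1)).sum := by
      rw [PySem.List.pyGetD_natCast, List.getD_eq_getElem _ _ hdlen, hcov, List.take_succ,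
        List.getElem?_eq_getElem hdlen, List.sum_append]
      simp
    have hSk : (pvS sentences)[k]'(by rw [pvLenS]; exact hk) = p := by
      have : (pvS sentences)[k]'(by rw [pvLenS]; exact hk)
          = ((pvPosList sentences 0)[k]).1 := List.getElem_map _
      rw [this, hposc.1]
    have hEk : (pvE sentences)[k]'(by rw [pvLenE]; exact hk) = p + PySem.Str.len s := by
      have : (pvE sentences)[k]'(by rw [pvLenE]; exact hk)
          = ((pvPosList sentences 0)[k]).2 := List.getElem_map _
      rw [this, hposc.1]
    have hiff : 0 < cover + PySem.List.pyGetD (pvDiff sentences spans) (k : Int) 0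
        ↔ (spans.any (fun sp => decide (sp.1 < p + PySem.Str.len s) && decide (sp.2 > p)) = true) := by
      rw [hcov', pvDiff_sum sentences spans k hk]
      rw [Int.natCast_pos, List.countP_pos_iff, List.any_eq_true]
      constructor
      · rintro ⟨sp, hmem, hsp⟩
        refine ⟨sp, hmem, ?_⟩
        simp only [Bool.and_eq_true, decide_eq_true_eq] at hsp ⊢
        have := (pvWindow (pvS sentences) (pvE sentences) (pvStarts_sorted sentences 0)
          (pvEnds_sorted sentences 0) sp.1 sp.2 k (by rw [pvLenE]; exact hk)
          (by rw [pvLenS]; exact hk)).mp hsp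
        rw [hSk, hEk] at this
        exact ⟨this.1, this.2⟩
      · rintro ⟨sp, hmem, hsp⟩
        refine ⟨sp, hmem, ?_⟩
        simp only [Bool.and_eq_true, decide_eq_true_eq] at hsp ⊢
        exact (pvWindow (pvS sentences) (pvE sentences) (pvStarts_sorted sentences 0)
          (pvEnds_sorted sentences 0) sp.1 sp.2 k (by rw [pvLenE]; exact hk)
          (by rw [pvLenS]; exact hk)).mpr (by rw [hSk, hEk]; exact ⟨hsp.1, hsp.2⟩)
    rw [PySem.List.enumerate_cons]
    simp only [List.foldl_cons]
    rw [show ((k : Int) + 1) = (((k + 1 : Nat)) : Int) from by push_cast; ring]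
    rw [show pvRef spans (s :: t) p
        = (if spans.any (fun sp => decide (sp.1 < p + PySem.Str.len s) && decide (sp.2 > p))
            then [s] else []) ++ pvRef spans t (p + PySem.Str.len s + 1) from rfl]
    by_cases hc : 0 < cover + PySem.List.pyGetD (pvDiff sentences spans) (k : Int) 0
    · rw [if_pos hc, if_pos (hiff.mp hc)]
      rw [ih (k + 1) (p + PySem.Str.len s + 1) _ (acc ++ [s]) hdrop' hposc.2 hcov']
      simp
    · rw [if_neg hc, if_neg (fun hC => hc (hiff.mpr hC))]
      rw [ih (k + 1) (p + PySem.Str.len s + 1) _ acc hdrop' hposc.2 hcov']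
      simp

-- ===== VERDICT (by name: the statement is the Claim_ definition above) =====
theorem extract_toxic_sentences_spec : Claim_equal_extract_toxic_sentences := by
  intro text sentences spans _
  unfold Spec_extract_toxic_sentences extract_toxic_sentences extract_toxic_sentences_alt
  rw [pvB_build]
  simp only []
  rw [pvA_fold spans sentences 0 []]
  rw [show ((([] : List Int) ++ (pvPosList sentences 0).map Prod.fst) = pvS sentences) from by simp [pvS]]
  rw [show ((([] : List Int) ++ (pvPosList sentences 0).map Prod.snd) = pvE sentences) from by simp [pvE]]
  rw [show (spans.foldl (fun (d : List Int) sp =>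
      let lo := PySem.List.bisectRight (pvE sentences) sp.1
      let hi := PySem.List.bisectLeft (pvS sentences) sp.2
      if lo < hi then
        let d1 := d.set lo (PySem.List.pyGetD d (lo : Int) 0 + 1)
        d1.set hi (PySem.List.pyGetD d1 (hi : Int) 0 - 1)
      else d)
    (List.replicate (sentences.length + 1) 0)) = pvDiff sentences spans from rfl]
  have h := pvMain sentences spans sentences 0 0 0 [] rfl rfl (by simp)
  simpa using h.symm
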